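-- pv_equiv track=rewrite | github.com/NguyenNhuDi/Kattis-solutions | distance.py | solve
-- ===== SOURCE A (Python) =====
-- def solve(arr):
--     out = 0
--     sum_so_far = 0
--     for i, elem in enumerate(arr):
--         if i == 0:
--             continue
--         sum_so_far += i * (elem - arr[i-1])
--         out += sum_so_far
--
--     return out
-- ===== SOURCE B (Python) =====
-- def solve(arr):
--     n = len(arr)
--     out = 0
--     for j in range(1, n):
--         out += j * (n - j) * (arr[j] - arr[j - 1])
--     return out
-- ===== Notes on version B (the rewrite author's own statement) =====
-- stated objective: simpler
-- what changed: Replaces A's two nested accumulators (running prefix sum sum_so_far plus its running total out) by a single accumulator using the closed-form weight j*(n-j) for each consecutive difference, obtained by swapping the order of the double summation.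
import Mathlib
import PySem

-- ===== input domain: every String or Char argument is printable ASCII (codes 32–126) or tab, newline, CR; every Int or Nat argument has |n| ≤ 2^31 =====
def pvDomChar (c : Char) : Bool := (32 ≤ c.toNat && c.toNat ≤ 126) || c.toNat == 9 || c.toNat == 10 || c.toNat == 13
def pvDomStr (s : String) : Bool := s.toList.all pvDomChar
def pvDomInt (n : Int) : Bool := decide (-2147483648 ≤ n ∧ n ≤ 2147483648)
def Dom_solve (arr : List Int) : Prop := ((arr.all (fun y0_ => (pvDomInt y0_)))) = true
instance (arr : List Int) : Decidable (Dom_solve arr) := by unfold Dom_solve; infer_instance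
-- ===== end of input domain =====

-- B replaces A's two nested accumulators by one loop with the closed-form weight j*(n-j) (simpler; same O(n) cost).

-- ===== PORT A =====
-- arr[i-1] is always in range here (the i = 0 iteration is skipped), so pyGetD with default 0 is exact.
def solveStepA (arr : List Int) (s : Int × Int) (p : Int × Int) : Int × Int :=
  if p.1 = 0 then s
  else
    let ssf := s.2 + p.1 * (p.2 - PySem.List.pyGetD arr (p.1 - 1) 0)
    (s.1 + ssf, ssf)

def solve (arr : List Int) : Int :=
  ((PySem.List.enumerate arr 0).foldl (solveStepA arr) (0, 0)).1

-- ===== PORT B =====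
-- arr[j] and arr[j-1] are always in range for j in range(1, n), so pyGetD with default 0 is exact.
def solveStepB (arr : List Int) (n out j : Int) : Int :=
  out + j * (n - j) * (PySem.List.pyGetD arr j 0 - PySem.List.pyGetD arr (j - 1) 0)

def solve_alt (arr : List Int) : Int :=
  let n : Int := PySem.List.len arr
  (PySem.List.pyRange 1 n 1).foldl (solveStepB arr n) 0

-- ===== PRECONDITION & SPEC =====
def Spec_solve (arr : List Int) (out : Int) : Prop := out = solve_alt arr
instance (arr : List Int) (out : Int) : Decidable (Spec_solve arr out) := by unfold Spec_solve; infer_instance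

-- ===== CLAIM (what is proved, stated in full; the proofs are below) =====
def Claim_equal_solve : Prop := ∀ (arr : List Int), Dom_solve arr → Spec_solve arr (solve arr)

-- ===== LEMMAS AND PROOFS =====

-- B's loop is a plain sum of the weighted differences.
lemma solve_alt_eq_sum (arr : List Int) :
    solve_alt arr
      = ((PySem.List.pyRange 1 (PySem.List.len arr) 1).map
          (fun j => j * ((PySem.List.len arr) - j)
            * (PySem.List.pyGetD arr j 0 - PySem.List.pyGetD arr (j - 1) 0))).sum := by
  show (PySem.List.pyRange 1 (PySem.List.len arr) 1).foldl
        (solveStepB arr (PySem.List.len arr)) 0 = _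
  rw [show solveStepB arr (PySem.List.len arr)
        = fun out j => out + j * ((PySem.List.len arr) - j)
            * (PySem.List.pyGetD arr j 0 - PySem.List.pyGetD arr (j - 1) 0) from rfl]
  rw [PySem.List.foldl_add]
  simp

-- Loop correspondence: over range [a, n) with 1 ≤ a ≤ n, A's paired fold equals the
-- weighted sum plus (n - a) copies of the incoming sum_so_far.
lemma solve_fold_corr (arr : List Int) (n : Int) :
    ∀ (k : Nat) (a : Int), 1 ≤ a → a ≤ n → n - a = (k : Int) →
    ∀ out ssf : Int,
      ((PySem.List.pyRange a n 1).foldl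
          (fun s j => solveStepA arr s (j, PySem.List.pyGetD arr j 0)) (out, ssf)).1
        = out
          + ((PySem.List.pyRange a n 1).map
              (fun j => j * (n - j)
                * (PySem.List.pyGetD arr j 0 - PySem.List.pyGetD arr (j - 1) 0))).sum
          + (n - a) * ssf := by
  intro k
  induction k with
  | zero =>
      intro a _ _ hk out ssf
      have ha : n = a := by omega
      subst ha
      rw [PySem.List.pyRange_one_eq_nil (by omega)]
      simp
  | succ m ih =>
      intro a ha1 _ hk out ssf
      have hlt : a < n := by omega
      rw [PySem.List.pyRange_one_cons hlt]
      simp only [List.foldl_cons, List.map_cons, List.sum_cons]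
      rw [show solveStepA arr (out, ssf) (a, PySem.List.pyGetD arr a 0)
            = (out + (ssf + a * (PySem.List.pyGetD arr a 0 - PySem.List.pyGetD arr (a - 1) 0)),
               ssf + a * (PySem.List.pyGetD arr a 0 - PySem.List.pyGetD arr (a - 1) 0))
          from by simp [solveStepA, if_neg (by omega : ¬ a = 0)]]
      rw [ih (a + 1) (by omega) (by omega) (by omega)]
      ring

theorem solve_spec : Claim_equal_solve := by
  intro arr _
  show solve arr = solve_alt arr
  rw [solve_alt_eq_sum]
  show ((PySem.List.enumerate arr 0).foldl (solveStepA arr) (0, 0)).1 = _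
  rw [PySem.List.enumerate_eq_map_pyRange (d := 0), List.foldl_map]
  rcases Nat.eq_zero_or_pos arr.length with h0 | hpos
  · have : arr = [] := List.eq_nil_of_length_eq_zero h0
    subst this
    simp [PySem.List.len, PySem.List.pyRange_one_eq_nil]
  · have hn : (0 : Int) < PySem.List.len arr := by
      simp [PySem.List.len]; omega
    rw [PySem.List.pyRange_one_cons hn]
    simp only [List.foldl_cons]
    rw [show solveStepA arr (0, 0) (0, PySem.List.pyGetD arr 0 0) = (0, 0) from by
      simp [solveStepA]]
    simp only [zero_add]
    rw [solve_fold_corr arr (PySem.List.len arr) (PySem.List.len arr - 1).toNat 1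
        (by omega) (by omega) (by simp [PySem.List.len]; omega) 0 0]
    ring
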